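-- pv_equiv track=rewrite | github.com/LautaroOchotorena/Numero-de-absorcion-y-transversal | Algoritmo.py | minimal
-- ===== SOURCE A (Python) =====
-- def minimal(E):
--     n = len(E)
--     i = 0
--     while i < n:
--         arista_1 = E[i]
--         j = 0
--         gate = True
--         while j < n and gate:
--             arista_2 = E[j]
--             if arista_2.issubset(arista_1) and (arista_1!=arista_2):
--                 E.pop(i)
--                 i -=1
--                 n -= 1
--                 gate = False
--             else:
--                 j += 1
--         i += 1
--     return E
-- ===== SOURCE B (Python) =====
-- def minimal(E):
--     n = len(E)
--     # process indices in order of increasing set size; a proper subset is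
--     # always strictly smaller, so a witness is always met before its superset
--     order = sorted(range(n), key=lambda k: len(E[k]))
--     kept = []  # (original index, set) pairs of accepted minimal sets
--     for k in order:
--         s = E[k]
--         if not any(t < s for _, t in kept):
--             kept.append((k, s))
--     kept.sort(key=lambda p: p[0])  # restore original order
--     E[:] = [s for _, s in kept]
--     return E
-- ===== Notes on version B (the rewrite author's own statement) =====
-- stated objective: faster
-- what changed: Instead of repeatedly rescanning and popping from the mutating list with index bookkeeping, B sorts indices by set size once and sweeps, testing each set only against the already-accepted minimal sets (every proper subset is strictly smaller, so it is seen first), then restores the original order.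
import Mathlib
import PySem

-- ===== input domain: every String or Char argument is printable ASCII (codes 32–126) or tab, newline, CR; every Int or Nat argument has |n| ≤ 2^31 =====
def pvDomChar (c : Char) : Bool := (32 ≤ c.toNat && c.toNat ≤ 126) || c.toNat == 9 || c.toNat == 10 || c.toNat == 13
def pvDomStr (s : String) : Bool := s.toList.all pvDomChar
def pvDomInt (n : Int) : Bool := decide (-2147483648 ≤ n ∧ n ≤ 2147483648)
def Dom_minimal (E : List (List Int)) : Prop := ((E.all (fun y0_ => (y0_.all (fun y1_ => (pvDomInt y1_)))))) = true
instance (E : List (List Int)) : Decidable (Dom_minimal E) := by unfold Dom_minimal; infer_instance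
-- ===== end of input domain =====

-- B replaces A's pop-and-rescan nested while loops by one size-ordered sweep that tests each
-- set only against the already-accepted minimal sets (a constant-factor mechanism; not timed here).
-- Both Pythons mutate E in place to the same final content; equivalence here is about the return value.


-- ===== PORT A =====
-- a.issubset(b) on Python sets (each List Int holds a set's elements, possibly with duplicates)
def pySubset (a b : List Int) : Bool := a.all (fun x => b.contains x)

-- A's removal condition: arista_2.issubset(arista_1) and (arista_1 != arista_2); set inequality = not mutual subset
def pyCondA (a1 a2 : List Int) : Bool := pySubset a2 a1 && !(pySubset a1 a2 && pySubset a2 a1)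

-- inner 'while j < n and gate' loop: returns whether some E[j] triggers the pop (gate flips)
def minimalInner (E : List (List Int)) (n : Int) (a1 : List Int) (j : Int) : Nat → Bool
  | 0 => false
  | fuel+1 =>
    if j < n then
      let a2 := PySem.List.pyGetD E j []
      if pyCondA a1 a2 then true
      else minimalInner E n a1 (j+1) fuel
    else false

-- outer 'while i < n' loop; fuel n - i, decreasing by 1 each iteration exactly as in A
def minimalOuter (E : List (List Int)) (n i : Int) : Nat → List (List Int)
  | 0 => E
  | fuel+1 =>
    if i < n then
      let a1 := PySem.List.pyGetD E i []
      if minimalInner E n a1 0 n.toNat then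
        match PySem.List.pop? E i with      -- E.pop(i); i -= 1; n -= 1; then i += 1
        | some (_, E') => minimalOuter E' (n - 1) ((i - 1) + 1) fuel
        | none => E                          -- unreachable: 0 ≤ i < n = len E
      else minimalOuter E n (i + 1) fuel
    else E

def minimal (E : List (List Int)) : List (List Int) :=
  minimalOuter E (E.length : Int) 0 E.length

-- ===== PORT B =====
-- t < s on Python sets: t ⊆ s and not s ⊆ t
def pyPsub (t s : List Int) : Bool := pySubset t s && !(pySubset s t)

def minimal_alt (E : List (List Int)) : List (List Int) :=
  let n := E.length
  -- len(E[k]) is the size of the SET E[k]: number of distinct elements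
  let order := PySem.List.sorted (PySem.List.pyRange 0 (n : Int) 1)
      (fun k => (PySem.List.dedup (PySem.List.pyGetD E k [])).length) false
  let kept := order.foldl (fun kept k =>
      let s := PySem.List.pyGetD E k []
      if kept.any (fun p => pyPsub p.2 s) then kept else kept ++ [(k, s)])
    ([] : List (Int × List Int))
  let kept := PySem.List.sorted kept (fun p => p.1) false
  kept.map (fun p => p.2)

-- ===== PRECONDITION & SPEC =====
def Spec_minimal (E : List (List Int)) (out : List (List Int)) : Prop := out = minimal_alt E
instance (E : List (List Int)) (out : List (List Int)) : Decidable (Spec_minimal E out) := by unfold Spec_minimal; infer_instance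

-- ===== CLAIM (what is proved, stated in full; the proofs are below) =====
def Claim_equal_minimal : Prop := ∀ (E : List (List Int)), Dom_minimal E → Spec_minimal E (minimal E)

-- ===== LEMMAS AND PROOFS =====

-- s is subset-minimal within E0 (no proper subset of s occurs in E0)
def notdom (E0 : List (List Int)) (s : List Int) : Bool := E0.all (fun t => !pyPsub t s)

theorem sub_iff (a b : List Int) : pySubset a b = true ↔ ∀ x ∈ a, x ∈ b := by
  simp [pySubset]

theorem psub_irrefl (s : List Int) : pyPsub s s = false := by
  simp [pyPsub]

theorem condA_eq (a1 a2 : List Int) : pyCondA a1 a2 = pyPsub a2 a1 := by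
  cases h1 : pySubset a2 a1 <;> cases h2 : pySubset a1 a2 <;>
    simp [pyCondA, pyPsub, h1, h2]

theorem psub_trans (u t s : List Int) (h1 : pyPsub u t = true) (h2 : pyPsub t s = true) :
    pyPsub u s = true := by
  simp only [pyPsub, Bool.and_eq_true, Bool.not_eq_true'] at *
  refine ⟨?_, ?_⟩
  · rw [sub_iff] at h1 h2 ⊢
    intro x hx; exact h2.1 x (h1.1 x hx)
  · rcases h2 with ⟨h2s, h2n⟩
    by_contra hc
    simp only [Bool.not_eq_false] at hc
    have : pySubset s t = true := by
      rw [sub_iff] at h1 ⊢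
      rw [sub_iff] at hc
      intro x hx; exact h1.1 x (hc x hx)
    rw [this] at h2n; exact absurd h2n (by simp)

theorem psub_card (t s : List Int) (h : pyPsub t s = true) :
    t.toFinset.card < s.toFinset.card := by
  simp only [pyPsub, Bool.and_eq_true, Bool.not_eq_true'] at h
  apply Finset.card_lt_card
  constructor
  · intro x hx
    simp only [List.mem_toFinset] at *
    exact (sub_iff t s).1 h.1 x hx
  · intro hsub
    have : pySubset s t = true := by
      rw [sub_iff]; intro x hx
      have := hsub (List.mem_toFinset.2 hx); simpa using this
    rw [this] at h; simp at h

theorem dedup_len (s : List Int) :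
    (PySem.List.dedup s).length = s.toFinset.card := by
  have hnd : (PySem.List.dedup s).Nodup := PySem.List.nodup_dedup s
  have hts : (PySem.List.dedup s).toFinset = s.toFinset := by
    ext x; simp
  rw [← hts, List.toFinset_card_of_nodup hnd]

theorem witness (E : List (List Int)) (s : List Int)
    (h : ∃ t ∈ E, pyPsub t s = true) :
    ∃ u ∈ E, pyPsub u s = true ∧ notdom E u = true := by
  obtain ⟨t, htE, hts⟩ := h
  induction hc : t.toFinset.card using Nat.strong_induction_on generalizing t s with
  | _ c ih =>
    by_cases hm : notdom E t = true
    · exact ⟨t, htE, hts, hm⟩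
    · have : ∃ v ∈ E, pyPsub v t = true := by
        simpa [notdom] using hm
      obtain ⟨v, hvE, hvt⟩ := this
      have hvc : v.toFinset.card < c := hc ▸ psub_card v t hvt
      exact ih v.toFinset.card hvc s v hvE (psub_trans v t s hvt hts) rfl

theorem inner_spec (E : List (List Int)) (a1 : List Int) :
    ∀ (fuel : Nat) (j : Nat), E.length - j ≤ fuel →
      minimalInner E (E.length : Int) a1 (j : Int) fuel
        = (E.drop j).any (fun a2 => pyPsub a2 a1) := by
  intro fuel
  induction fuel with
  | zero =>
    intro j hj
    have : E.length ≤ j := by omega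
    simp [minimalInner, List.drop_eq_nil_of_le this]
  | succ f ih =>
    intro j hj
    by_cases hlt : j < E.length
    · have hlt' : (j : Int) < (E.length : Int) := by exact_mod_cast hlt
      have hget : PySem.List.pyGetD E (j : Int) [] = E[j] := by
        simp [PySem.List.pyGetD_natCast, List.getElem?_eq_getElem hlt]
      rw [minimalInner, if_pos hlt', List.drop_eq_getElem_cons hlt]
      simp only [hget, condA_eq, List.any_cons]
      by_cases hc : pyPsub E[j] a1 = true
      · simp [hc]
      · have : ((j : Int) + 1) = ((j + 1 : Nat) : Int) := by push_cast; ring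
        simp only [hc, Bool.false_or, this]
        rw [ih (j+1) (by omega)]
        simp
    · have hge : (E.length : Int) ≤ (j : Int) := by exact_mod_cast (by omega : E.length ≤ j)
      rw [minimalInner, if_neg (by omega)]
      simp [List.drop_eq_nil_of_le (by omega : E.length ≤ j)]

theorem pop_mid (P R : List (List Int)) (r : List Int) :
    PySem.List.pop? (P ++ r :: R) (P.length : Int) = some (r, P ++ R) := by
  have hlen : P.length < (P ++ r :: R).length := by simp
  rw [PySem.List.pop?_natCast (P ++ r :: R) P.length hlen]
  congr 1
  have h1 : (P ++ r :: R)[P.length] = r := by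
    rw [List.getElem_append_right (le_refl P.length)]
    simp
  have h2 : (P ++ r :: R).eraseIdx P.length = P ++ R := by
    rw [List.eraseIdx_append_of_length_le (le_refl P.length)]
    simp
  rw [h1, h2]

theorem any_cond_eq (E0 P Q R' : List (List Int)) (r : List Int)
    (hE0 : E0 = Q ++ r :: R') (hP : P = Q.filter (notdom E0)) :
    ((P ++ r :: R').any (fun t => pyPsub t r)) = !(notdom E0 r) := by
  by_cases hnd : notdom E0 r = true
  · rw [hnd]
    simp only [Bool.not_true, List.any_eq_false]
    intro t ht
    have htE0 : t ∈ E0 := by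
      rcases List.mem_append.1 ht with h | h
      · exact hE0 ▸ List.mem_append_left _ (List.mem_of_mem_filter (hP ▸ h))
      · exact hE0 ▸ List.mem_append_right _ h
    have := (List.all_eq_true.1 hnd) t htE0
    simpa using this
  · have hnd' : notdom E0 r = false := by simpa using hnd
    rw [hnd']
    simp only [Bool.not_false, List.any_eq_true]
    have hex : ∃ t ∈ E0, pyPsub t r = true := by
      have := hnd'
      simp only [notdom, List.all_eq_false] at this
      obtain ⟨t, ht, h⟩ := this
      exact ⟨t, ht, by simpa using h⟩
    obtain ⟨u, huE, hur, humin⟩ := witness E0 r hex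
    refine ⟨u, ?_, hur⟩
    rw [hE0] at huE
    rcases List.mem_append.1 huE with h | h
    · exact List.mem_append_left _ (hP ▸ List.mem_filter.2 ⟨h, humin⟩)
    · rcases List.mem_cons.1 h with h | h
      · exfalso; rw [h] at hur; rw [psub_irrefl] at hur; exact absurd hur (by simp)
      · exact List.mem_append_right _ (List.mem_cons_of_mem _ h)

theorem outer_spec (E0 : List (List Int)) :
    ∀ (R P Q : List (List Int)) (fuel : Nat), R.length ≤ fuel →
      E0 = Q ++ R → P = Q.filter (notdom E0) →
      minimalOuter (P ++ R) (((P ++ R).length : Int)) ((P.length : Int)) fuel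
        = E0.filter (notdom E0) := by
  intro R
  induction R with
  | nil =>
    intro P Q fuel _ hE0 hP
    have hret : minimalOuter (P ++ []) (((P ++ []).length : Int)) ((P.length : Int)) fuel = P ++ [] := by
      cases fuel with
      | zero => rw [minimalOuter]
      | succ f => rw [minimalOuter, if_neg (by simp)]
    rw [hret]
    simp only [List.append_nil] at *
    rw [hP, ← hE0]
  | cons r R' ih =>
    intro P Q fuel hfuel hE0 hP
    obtain ⟨f, rfl⟩ : ∃ f, fuel = f + 1 := ⟨fuel - 1, by simp at hfuel; omega⟩
    have hilt : (P.length : Int) < ((P ++ r :: R').length : Int) := by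
      exact_mod_cast (by simp : P.length < (P ++ r :: R').length)
    rw [minimalOuter, if_pos hilt]
    have hget : PySem.List.pyGetD (P ++ r :: R') ((P.length : Int)) [] = r := by
      rw [PySem.List.pyGetD_natCast]
      have hl : P.length < (P ++ r :: R').length := by simp
      rw [List.getD_eq_getElem _ [] hl]
      rw [List.getElem_append_right (le_refl P.length)]
      simp
    have htonat : ((((P ++ r :: R').length : Int)).toNat) = (P ++ r :: R').length := Int.toNat_natCast _
    have hinner : minimalInner (P ++ r :: R') (((P ++ r :: R').length : Int)) r 0
        ((((P ++ r :: R').length : Int)).toNat) = !(notdom E0 r) := by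
      rw [htonat]
      have := inner_spec (P ++ r :: R') r ((P ++ r :: R').length) 0 (Nat.sub_le _ _)
      simp only [Nat.cast_zero] at this
      rw [this]
      simp only [List.drop_zero]
      exact any_cond_eq E0 P Q R' r hE0 hP
    simp only [hget, hinner]
    by_cases hnd : notdom E0 r = true
    · -- kept: recurse with i+1
      rw [hnd]
      simp only [Bool.not_true, if_neg (by simp : ¬(false = true))]
      have hlen1 : (P.length : Int) + 1 = ((P ++ [r]).length : Int) := by simp
      rw [hlen1, (by simp : P ++ r :: R' = (P ++ [r]) ++ R')]
      exact ih (P ++ [r]) (Q ++ [r]) f (by simp at hfuel; omega)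
        (by rw [hE0]; simp)
        (by rw [List.filter_append, ← hP]; simp [hnd])
    · -- popped
      have hnd' : notdom E0 r = false := by simpa using hnd
      rw [hnd']
      simp only [Bool.not_false]
      rw [pop_mid]
      have h1 : ((P ++ r :: R').length : Int) - 1 = ((P ++ R').length : Int) := by
        simp; ring
      have h2 : ((P.length : Int) - 1) + 1 = (P.length : Int) := by ring
      rw [h1, h2]
      exact ih P (Q ++ [r]) f (by simp at hfuel; omega)
        (by rw [hE0]; simp)
        (by rw [List.filter_append, ← hP]; simp [hnd'])

theorem fold_spec (E : List (List Int)) (order : List Int)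
    (horder : order = PySem.List.sorted (PySem.List.pyRange 0 (E.length : Int) 1)
      (fun k => (PySem.List.dedup (PySem.List.pyGetD E k [])).length) false) :
    ∀ (rest done : List Int), order = done ++ rest →
      rest.foldl (fun kept k =>
          let s := PySem.List.pyGetD E k []
          if kept.any (fun p => pyPsub p.2 s) then kept else kept ++ [(k, s)])
        ((done.filter (fun k => notdom E (PySem.List.pyGetD E k []))).map
          (fun k => (k, PySem.List.pyGetD E k [])))
      = (order.filter (fun k => notdom E (PySem.List.pyGetD E k []))).map
          (fun k => (k, PySem.List.pyGetD E k [])) := by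
  have hperm : order.Perm (PySem.List.pyRange 0 (E.length : Int) 1) := by
    rw [horder]; exact PySem.List.sorted_perm _ _ _
  have hmem : ∀ k ∈ order, 0 ≤ k ∧ k < (E.length : Int) := by
    intro k hk
    have := hperm.mem_iff.1 hk
    exact (PySem.List.mem_pyRange_one).1 this
  have hpw : order.Pairwise (fun a b =>
      (PySem.List.dedup (PySem.List.pyGetD E a [])).length ≤
      (PySem.List.dedup (PySem.List.pyGetD E b [])).length) := by
    rw [horder]; exact PySem.List.sorted_pairwise _ _
  intro rest
  induction rest with
  | nil => intro done h; simp [h]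
  | cons k rest' ih =>
    intro done hsplit
    rw [List.foldl_cons]
    have hcheck : (((done.filter (fun k => notdom E (PySem.List.pyGetD E k []))).map
        (fun k => (k, PySem.List.pyGetD E k []))).any
          (fun p => pyPsub p.2 (PySem.List.pyGetD E k [])))
        = !(notdom E (PySem.List.pyGetD E k [])) := by
      set s := PySem.List.pyGetD E k [] with hs
      by_cases hg : notdom E s = true
      · rw [hg]
        simp only [Bool.not_true, List.any_eq_false]
        rintro p hp
        simp only [List.mem_map, List.mem_filter] at hp
        obtain ⟨k', ⟨hk'd, hk'g⟩, rfl⟩ := hp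
        have hk'o : k' ∈ order := hsplit ▸ List.mem_append_left _ hk'd
        obtain ⟨h0, hn⟩ := hmem k' hk'o
        have hmemE : PySem.List.pyGetD E k' [] ∈ E :=
          PySem.List.pyGetD_mem E [] ⟨by omega, hn⟩
        have := (List.all_eq_true.1 hg) _ hmemE
        simpa using this
      · have hg' : notdom E s = false := by simpa using hg
        rw [hg']
        simp only [Bool.not_false, List.any_eq_true]
        have hex : ∃ t ∈ E, pyPsub t s = true := by
          simp only [notdom, List.all_eq_false] at hg'
          obtain ⟨t, ht, h⟩ := hg'
          exact ⟨t, ht, by simpa using h⟩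
        obtain ⟨u, huE, hus, humin⟩ := witness E s hex
        obtain ⟨m, hm, hu⟩ := List.getElem_of_mem huE
        have hgetm : PySem.List.pyGetD E ((m : Nat) : Int) [] = u := by
          rw [PySem.List.pyGetD_natCast, List.getD_eq_getElem _ [] hm, hu]
        have hk'o : ((m : Nat) : Int) ∈ order := by
          rw [hperm.mem_iff, PySem.List.mem_pyRange_one]
          constructor
          · exact_mod_cast Nat.zero_le m
          · exact_mod_cast hm
        rw [hsplit] at hk'o
        rcases List.mem_append.1 hk'o with hdone | hrest
        · refine ⟨((((m : Nat) : Int)), PySem.List.pyGetD E ((m : Nat) : Int) []), ?_, ?_⟩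
          · refine List.mem_map.2 ⟨((m : Nat) : Int), List.mem_filter.2 ⟨hdone, ?_⟩, rfl⟩
            rw [hgetm]; exact humin
          · simpa [hgetm] using hus
        · rcases List.mem_cons.1 hrest with heq | hrest'
          · exfalso
            rw [← heq] at hs
            rw [hgetm] at hs
            rw [hs] at hus
            rw [psub_irrefl] at hus
            exact absurd hus (by simp)
          · exfalso
            have hkk' : (PySem.List.dedup (PySem.List.pyGetD E k [])).length ≤
                (PySem.List.dedup (PySem.List.pyGetD E ((m : Nat) : Int) [])).length := by
              have hsub : (k :: rest').Sublist order := by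
                rw [hsplit]; exact (List.sublist_append_right _ _)
              have := hpw.sublist hsub
              exact List.rel_of_pairwise_cons this hrest'
            rw [hgetm, ← hs] at hkk'
            have h1 := psub_card u s hus
            rw [dedup_len, dedup_len] at hkk'
            omega
    simp only [hcheck]
    by_cases hg : notdom E (PySem.List.pyGetD E k []) = true
    · simp only [hg, Bool.not_true]
      have : ((done.filter (fun k => notdom E (PySem.List.pyGetD E k []))).map
            (fun k => (k, PySem.List.pyGetD E k []))) ++ [(k, PySem.List.pyGetD E k [])]
          = (((done ++ [k]).filter (fun k => notdom E (PySem.List.pyGetD E k []))).map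
            (fun k => (k, PySem.List.pyGetD E k []))) := by
        rw [List.filter_append, List.map_append]
        simp [hg]
      simp only [if_neg (by simp : ¬(false = true))]
      rw [this]
      exact ih (done ++ [k]) (by rw [hsplit]; simp)
    · have hg' : notdom E (PySem.List.pyGetD E k []) = false := by simpa using hg
      simp only [hg', Bool.not_false]
      have : (done.filter (fun k => notdom E (PySem.List.pyGetD E k []))).map
            (fun k => (k, PySem.List.pyGetD E k []))
          = ((done ++ [k]).filter (fun k => notdom E (PySem.List.pyGetD E k []))).map
            (fun k => (k, PySem.List.pyGetD E k [])) := by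
        rw [List.filter_append]
        simp [hg']
      rw [this]
      exact ih (done ++ [k]) (by rw [hsplit]; simp)

theorem map_getD_range (E : List (List Int)) :
    (List.range E.length).map (fun m => E.getD m ([] : List Int)) = E := by
  apply List.ext_getElem
  · simp
  · intro i h1 h2
    simp [List.getElem?_eq_getElem h2]

theorem filter_range_getD (E : List (List Int)) (p : List Int → Bool) :
    ((List.range E.length).filter (fun m => p (E.getD m []))).map
      (fun m => E.getD m ([] : List Int)) = E.filter p := by
  conv_rhs => rw [← map_getD_range E]
  rw [List.filter_map]
  rfl

theorem minimal_alt_eq_filter (E : List (List Int)) :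
    minimal_alt E = E.filter (notdom E) := by
  have hkept := fold_spec E
    (PySem.List.sorted (PySem.List.pyRange 0 (E.length : Int) 1)
      (fun k => (PySem.List.dedup (PySem.List.pyGetD E k [])).length) false) rfl
    (PySem.List.sorted (PySem.List.pyRange 0 (E.length : Int) 1)
      (fun k => (PySem.List.dedup (PySem.List.pyGetD E k [])).length) false) [] (by simp)
  simp only [List.filter_nil, List.map_nil] at hkept
  have hsort : PySem.List.sorted
      (((PySem.List.sorted (PySem.List.pyRange 0 (E.length : Int) 1)
          (fun k => (PySem.List.dedup (PySem.List.pyGetD E k [])).length) false).filter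
            (fun k => notdom E (PySem.List.pyGetD E k []))).map
          (fun k => (k, PySem.List.pyGetD E k [])))
      (fun p => p.1) false
      = ((PySem.List.pyRange 0 (E.length : Int) 1).filter
            (fun k => notdom E (PySem.List.pyGetD E k []))).map
          (fun k => (k, PySem.List.pyGetD E k [])) := by
    apply PySem.List.sorted_eq_of_perm_of_pairwise_lt
    · exact (((PySem.List.sorted_perm _ _ _).filter _).map _).symm
    · have h1 : (PySem.List.pyRange 0 (E.length : Int) 1).Pairwise (· < ·) :=
        PySem.List.pairwise_lt_pyRange_one 0 (E.length : Int)
      have h2 := h1.sublist (List.filter_sublist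
        (p := fun k => notdom E (PySem.List.pyGetD E k [])))
      exact (List.pairwise_map).2 (by exact h2)
  show ((PySem.List.sorted _ _ _).map _ : List (List Int)) = _
  rw [hkept, hsort, List.map_map]
  rw [PySem.List.pyRange_one]
  simp only [zero_add, List.filter_map, List.map_map]
  simp only [Function.comp_def, PySem.List.pyGetD_natCast, Int.sub_zero, Int.toNat_natCast]
  exact filter_range_getD E (notdom E)

theorem minimal_eq_filter (E : List (List Int)) :
    minimal E = E.filter (notdom E) := by
  have := outer_spec E E [] [] E.length (le_refl _) (by simp) (by simp)
  simpa [minimal] using this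

-- ===== VERDICT (by name: the statement is the Claim_ definition above) =====
theorem minimal_spec : Claim_equal_minimal := by
  intro E _
  show minimal E = minimal_alt E
  rw [minimal_eq_filter, minimal_alt_eq_filter]
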